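-- pv_equiv track=rewrite | github.com/DarkBones/darkrag | file_to_vec/splitters/base_splitter.py | _find_sentence_break
-- ===== SOURCE A (Python) =====
-- def _find_sentence_break(text: str, max_size: int) -> int:
--     last_break = -1
--     current = 0
--     while current < len(text) and current < max_size:
--         if text[current] in ".?!":
--             # Advance past any extra punctuation characters.
--             temp = current + 1
--             while temp < len(text) and text[temp] in ".?!":
--                 temp += 1
--             last_break = temp
--         current += 1
--     return last_break
-- ===== SOURCE B (Python) =====
-- def _find_sentence_break(text: str, max_size: int) -> int:
--     n = len(text)
--     i = min(n, max_size) - 1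
--     while i >= 0:
--         if text[i] in ".?!":
--             # Extend forward past the whole punctuation run (bounded by len only).
--             j = i + 1
--             while j < n and text[j] in ".?!":
--                 j += 1
--             return j
--         i -= 1
--     return -1
-- ===== Notes on version B (the rewrite author's own statement) =====
-- stated objective: faster
-- what changed: B scans right-to-left from min(len,max_size)-1 and returns at the first (i.e. last in-range) sentence punctuation, extending forward over its run, instead of A's full forward pass that re-extends the run and overwrites last_break at every punctuation character.
import Mathlib
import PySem

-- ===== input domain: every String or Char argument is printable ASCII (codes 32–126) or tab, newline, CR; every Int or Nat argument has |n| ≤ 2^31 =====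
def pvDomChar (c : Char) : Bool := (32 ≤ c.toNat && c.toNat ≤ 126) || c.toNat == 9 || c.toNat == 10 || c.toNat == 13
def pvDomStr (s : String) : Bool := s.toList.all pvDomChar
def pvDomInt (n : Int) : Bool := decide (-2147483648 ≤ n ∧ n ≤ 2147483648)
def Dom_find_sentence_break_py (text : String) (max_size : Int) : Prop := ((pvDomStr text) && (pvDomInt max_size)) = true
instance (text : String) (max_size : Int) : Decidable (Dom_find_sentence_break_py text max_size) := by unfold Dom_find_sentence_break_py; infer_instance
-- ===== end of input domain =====

-- B finds the last in-range sentence punctuation by a right-to-left scan (then extends over its run)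
-- instead of A's forward pass that overwrites last_break at every punctuation character; same return value.


-- ===== PORT A =====
-- `c in ".?!"` (shared by both Pythons' membership tests)
def pvPunct (c : Char) : Bool := c == '.' || c == '?' || c == '!'

-- the inner `while temp < len(text) and text[temp] in ".?!": temp += 1` loop
-- (identical in A and in B's forward run extension); getD is exact here since
-- the index is checked in range before use.
def pvRunEnd (L : List Char) (temp : Nat) : Nat :=
  if temp < L.length ∧ pvPunct (L.getD temp ' ') then pvRunEnd L (temp + 1) else temp
termination_by L.length - temp
decreasing_by omega

-- A's outer `while current < len(text) and current < max_size` loop with last_break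
def pvALoop (L : List Char) (max_size : Int) (current : Nat) (last_break : Int) : Int :=
  if current < L.length ∧ (current : Int) < max_size then
    pvALoop L max_size (current + 1)
      (if pvPunct (L.getD current ' ') then ((pvRunEnd L (current + 1) : Nat) : Int) else last_break)
  else last_break
termination_by L.length - current
decreasing_by omega

def find_sentence_break_py (text : String) (max_size : Int) : Int :=
  pvALoop text.toList max_size 0 (-1)

-- ===== PORT B =====
-- B's `while i >= 0` descending scan; argument i is (index being examined) + 1,
-- so pvBScan L (min n max_size) examines indices min(n,max_size)-1, …, 0.
def pvBScan (L : List Char) (i : Nat) : Int :=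
  match i with
  | 0 => -1
  | k + 1 =>
    if pvPunct (L.getD k ' ') then ((pvRunEnd L (k + 1) : Nat) : Int)
    else pvBScan L k

-- `min(n, max_size)` as a Nat: for negative max_size Python's loop never runs, matching toNat = 0.
def find_sentence_break_py_alt (text : String) (max_size : Int) : Int :=
  pvBScan text.toList (min text.toList.length max_size.toNat)

-- ===== PRECONDITION & SPEC =====
def Spec_find_sentence_break_py (text : String) (max_size : Int) (out : Int) : Prop := out = find_sentence_break_py_alt text max_size
instance (text : String) (max_size : Int) (out : Int) : Decidable (Spec_find_sentence_break_py text max_size out) := by unfold Spec_find_sentence_break_py; infer_instance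

-- ===== CLAIM (what is proved, stated in full; the proofs are below) =====
def Claim_equal_find_sentence_break_py : Prop := ∀ (text : String) (max_size : Int), Dom_find_sentence_break_py text max_size → Spec_find_sentence_break_py text max_size (find_sentence_break_py text max_size)

-- ===== LEMMAS AND PROOFS =====

-- proof helper: the largest index k with c ≤ k < i and punct(L[k]), scanning downward
def pvFind? (L : List Char) (c i : Nat) : Option Nat :=
  match i with
  | 0 => none
  | k + 1 => if c ≤ k ∧ pvPunct (L.getD k ' ') then some k else pvFind? L c k

lemma pvFind?_none_of_le (L : List Char) (c i : Nat) (h : i ≤ c) : pvFind? L c i = none := by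
  induction i with
  | zero => rfl
  | succ k ih =>
    unfold pvFind?
    rw [if_neg (by omega), ih (by omega)]

lemma pvFind?_step (L : List Char) (c i : Nat) (h : c < i) :
    pvFind? L c i =
      match pvFind? L (c + 1) i with
      | some k => some k
      | none => if pvPunct (L.getD c ' ') then some c else none := by
  induction i with
  | zero => omega
  | succ k ih =>
    by_cases hck : c = k
    · subst hck
      unfold pvFind?
      rw [pvFind?_none_of_le L (c + 1) c (by omega),
          pvFind?_none_of_le L c c (le_refl _),
          if_neg (show ¬(c + 1 ≤ c ∧ pvPunct (L.getD c ' ') = true) by rintro ⟨h1, _⟩; omega)]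
      by_cases hp : pvPunct (L.getD c ' ')
      · rw [if_pos ⟨le_refl c, hp⟩, if_pos hp]
      · rw [if_neg (fun hx => hp hx.2), if_neg hp]
    · have hlt : c < k := by omega
      unfold pvFind?
      by_cases hp : pvPunct (L.getD k ' ')
      · rw [if_pos ⟨by omega, hp⟩, if_pos ⟨by omega, hp⟩]
      · rw [if_neg (fun hx => hp hx.2), if_neg (fun hx => hp hx.2), ih hlt]

-- A's loop computes the downward-scan answer over the untouched range [current, min(len, max_size))
lemma pvALoop_eq (L : List Char) (max_size : Int) (c : Nat) (last : Int) :
    pvALoop L max_size c last =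
      match pvFind? L c (min L.length max_size.toNat) with
      | some k => ((pvRunEnd L (k + 1) : Nat) : Int)
      | none => last := by
  set m := min L.length max_size.toNat with hm
  by_cases h : c < L.length ∧ (c : Int) < max_size
  · have hcm : c < m := by
      have : c < max_size.toNat := by omega
      omega
    have hrec : pvALoop L max_size c last =
        pvALoop L max_size (c + 1)
          (if pvPunct (L.getD c ' ') then ((pvRunEnd L (c + 1) : Nat) : Int) else last) := by
      rw [pvALoop, if_pos h]
    rw [hrec, pvALoop_eq L max_size (c + 1), pvFind?_step L c m hcm]
    cases pvFind? L (c + 1) m with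
    | some k => rfl
    | none =>
      by_cases hp : pvPunct (L.getD c ' ')
      · rw [if_pos hp, if_pos hp]
      · rw [if_neg hp, if_neg hp]
  · have hcm : m ≤ c := by
      rcases (not_and_or.mp h) with h1 | h1
      · omega
      · have : max_size.toNat ≤ c := by omega
        omega
    rw [pvALoop, if_neg h, pvFind?_none_of_le L c m hcm]
termination_by L.length - c
decreasing_by omega

-- B's scan equals the downward-scan helper with lower bound 0
lemma pvBScan_eq (L : List Char) (i : Nat) :
    pvBScan L i =
      match pvFind? L 0 i with
      | some k => ((pvRunEnd L (k + 1) : Nat) : Int)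
      | none => -1 := by
  induction i with
  | zero => rfl
  | succ k ih =>
    unfold pvBScan pvFind?
    by_cases hp : pvPunct (L.getD k ' ')
    · rw [if_pos hp, if_pos ⟨Nat.zero_le _, hp⟩]
    · rw [if_neg hp, if_neg (by tauto), ih]

-- ===== VERDICT (by name: the statement is the Claim_ definition above) =====
theorem find_sentence_break_py_spec : Claim_equal_find_sentence_break_py := by
  intro text max_size _
  unfold Spec_find_sentence_break_py find_sentence_break_py find_sentence_break_py_alt
  rw [pvALoop_eq, pvBScan_eq]
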